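-- pv_equiv track=rewrite | github.com/vklochakSJ/mafiacitypoker | server.py | find_flushes_5plus
-- ===== SOURCE A (Python) =====
-- import itertools
-- from typing import Dict, List, Tuple, Optional, Any, Set
--
-- def find_flushes_5plus(hand_cards: List[Tuple[str, str]]) -> List[List[Tuple[str, str]]]:
--     by_suit: Dict[str, List[Tuple[str, str]]] = {}
--     for c in hand_cards:
--         by_suit.setdefault(c[1], []).append(c)
--     out: List[List[Tuple[str, str]]] = []
--     for _, cards in by_suit.items():
--         if len(cards) >= 5:
--             combos = list(itertools.combinations(cards, 5))[:25]
--             out.extend([list(x) for x in combos])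
--     return out
-- ===== SOURCE B (Python) =====
-- def find_flushes_5plus(hand_cards):
--     # distinct suits in first-appearance order
--     suits = []
--     for c in hand_cards:
--         if c[1] not in suits:
--             suits.append(c[1])
--     out = []
--     for s in suits:
--         cards = [c for c in hand_cards if c[1] == s]
--         if len(cards) >= 5:
--             # DP table: ck = first 25 k-card combinations (lexicographic by index),
--             # built right-to-left; truncating each level to 25 keeps exactly the
--             # needed prefix, so no full combination list is ever materialized
--             c0, c1, c2, c3, c4, c5 = [[]], [], [], [], [], []
--             for x in reversed(cards):
--                 c5 = ([[x] + t for t in c4] + c5)[:25]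
--                 c4 = ([[x] + t for t in c3] + c4)[:25]
--                 c3 = ([[x] + t for t in c2] + c3)[:25]
--                 c2 = ([[x] + t for t in c1] + c2)[:25]
--                 c1 = ([[x] + t for t in c0] + c1)[:25]
--             out.extend(c5)
--     return out
-- ===== Notes on version B (the rewrite author's own statement) =====
-- stated objective: faster
-- what changed: B replaces the dict-of-lists grouping and itertools.combinations with a first-appearance suit scan plus per-suit filtering, and builds only the first 25 five-card combinations by a dynamic-programming fold over the suit's cards that maintains the first 25 k-card combinations for each k=0..5, instead of materializing all C(m,5) combinations and slicing.
import Mathlib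
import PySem

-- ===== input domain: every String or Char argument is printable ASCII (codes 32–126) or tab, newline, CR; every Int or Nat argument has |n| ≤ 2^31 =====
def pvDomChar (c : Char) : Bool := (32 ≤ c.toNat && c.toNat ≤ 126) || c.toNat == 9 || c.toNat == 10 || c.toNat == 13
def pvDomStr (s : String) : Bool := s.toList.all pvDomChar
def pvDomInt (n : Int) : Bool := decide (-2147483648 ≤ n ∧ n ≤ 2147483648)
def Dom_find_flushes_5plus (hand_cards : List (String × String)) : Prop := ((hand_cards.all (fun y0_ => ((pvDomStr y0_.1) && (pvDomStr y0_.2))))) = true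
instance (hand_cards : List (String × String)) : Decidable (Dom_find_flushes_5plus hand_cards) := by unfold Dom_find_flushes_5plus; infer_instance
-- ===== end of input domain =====

-- B replaces the dict grouping + itertools.combinations with a first-appearance suit scan,
-- per-suit filtering, and a DP fold keeping only the first 25 k-card combinations (k=0..5),
-- so it never materializes all C(m,5) combinations (objective: faster).


-- ===== PORT A =====
-- itertools.combinations(cards, 5): lexicographic by index (exact order of the library)
def pyCombs {α : Type} (k : Nat) (xs : List α) : List (List α) :=
  match k, xs with
  | 0, _ => [[]]
  | _ + 1, [] => []
  | k + 1, x :: rest => (pyCombs k rest).map (x :: ·) ++ pyCombs (k + 1) rest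

def find_flushes_5plus (hand_cards : List (String × String)) : List (List (String × String)) :=
  let by_suit : PySem.Dict String (List (String × String)) :=
    hand_cards.foldl (fun d c => d.modify c.2 [] (· ++ [c])) PySem.Dict.empty
  by_suit.items.foldl
    (fun out p => if p.2.length ≥ 5 then out ++ (pyCombs 5 p.2).take 25 else out) []

-- ===== PORT B =====
-- the DP step of Source B's inner loop: one card prepended to every (k-1)-combination,
-- k = 5..1, each level truncated to its first 25 entries
def dpStep {α : Type} (x : α)
    (st : List (List α) × List (List α) × List (List α) × List (List α) × List (List α) × List (List α)) :
    List (List α) × List (List α) × List (List α) × List (List α) × List (List α) × List (List α) :=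
  (st.1,
   (st.1.map (x :: ·) ++ st.2.1).take 25,
   (st.2.1.map (x :: ·) ++ st.2.2.1).take 25,
   (st.2.2.1.map (x :: ·) ++ st.2.2.2.1).take 25,
   (st.2.2.2.1.map (x :: ·) ++ st.2.2.2.2.1).take 25,
   (st.2.2.2.2.1.map (x :: ·) ++ st.2.2.2.2.2).take 25)

-- 'for x in reversed(cards)' with the six lists as state = a foldr over cards
def dpCombs5 {α : Type} (cards : List α) : List (List α) :=
  (cards.foldr dpStep ([[]], [], [], [], [], [])).2.2.2.2.2

def find_flushes_5plus_alt (hand_cards : List (String × String)) : List (List (String × String)) :=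
  let suits := hand_cards.foldl
    (fun suits c => if suits.contains c.2 then suits else suits ++ [c.2]) []
  suits.foldl
    (fun out s =>
      let cards := hand_cards.filter (fun c => c.2 == s)
      if cards.length ≥ 5 then out ++ dpCombs5 cards else out) []

-- ===== PRECONDITION & SPEC =====
def Spec_find_flushes_5plus (hand_cards : List (String × String)) (out : List (List (String × String))) : Prop := out = find_flushes_5plus_alt hand_cards
instance (hand_cards : List (String × String)) (out : List (List (String × String))) : Decidable (Spec_find_flushes_5plus hand_cards out) := by unfold Spec_find_flushes_5plus; infer_instance

-- ===== CLAIM =====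
def Claim_equal_find_flushes_5plus : Prop := ∀ (hand_cards : List (String × String)), Dom_find_flushes_5plus hand_cards → Spec_find_flushes_5plus hand_cards (find_flushes_5plus hand_cards)

-- ===== LEMMAS AND PROOFS =====

-- truncation to n commutes with the DP step's block-prepend shape
theorem take_append_take_left {α : Type} (n : Nat) (l₁ l₂ : List α) :
    (l₁.take n ++ l₂).take n = (l₁ ++ l₂).take n := by
  rw [List.take_append, List.take_append, List.take_take, List.length_take,
    Nat.min_self, show n - min n l₁.length = n - l₁.length by omega]

theorem take_append_take_right {α : Type} (n : Nat) (l₁ l₂ : List α) :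
    (l₁ ++ l₂.take n).take n = (l₁ ++ l₂).take n := by
  rw [List.take_append, List.take_append, List.take_take,
    show min (n - l₁.length) n = n - l₁.length by omega]

-- the DP fold's state holds the first 25 k-card combinations, k = 0..5
theorem foldr_dpStep {α : Type} (xs : List α) :
    xs.foldr dpStep (([[]], [], [], [], [], []) :
        List (List α) × List (List α) × List (List α) × List (List α) × List (List α) × List (List α)) =
      (pyCombs 0 xs, (pyCombs 1 xs).take 25, (pyCombs 2 xs).take 25,
       (pyCombs 3 xs).take 25, (pyCombs 4 xs).take 25, (pyCombs 5 xs).take 25) := by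
  induction xs with
  | nil => simp [pyCombs]
  | cons x rest ih =>
    simp only [List.foldr_cons, ih, dpStep, pyCombs, Prod.mk.injEq]
    refine ⟨trivial, ?_, ?_, ?_, ?_, ?_⟩ <;>
      simp [take_append_take_right, take_append_take_left, List.take_take]

theorem dpCombs5_eq {α : Type} (xs : List α) : dpCombs5 xs = (pyCombs 5 xs).take 25 := by
  simp [dpCombs5, foldr_dpStep]

-- Source B's suit-collection loop builds list(dict.fromkeys(suits))
theorem suits_loop_eq (hand_cards : List (String × String)) :
    hand_cards.foldl (fun suits c => if suits.contains c.2 then suits else suits ++ [c.2]) [] =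
      PySem.List.dedup (hand_cards.map (·.2)) := by
  rw [PySem.List.dedup_eq_ofList, PySem.Set.ofList_eq_foldl, List.foldl_map]
  rfl

-- the grouping loop's dict maps each suit to the cards of that suit, in hand order
theorem getD_group (l : List (String × String)) (d : PySem.Dict String (List (String × String)))
    (s : String) :
    (l.foldl (fun d c => d.modify c.2 [] (· ++ [c])) d).getD s [] =
      d.getD s [] ++ l.filter (fun c => c.2 == s) := by
  induction l generalizing d with
  | nil => simp
  | cons c l ih =>
    simp only [List.foldl_cons, List.filter_cons, ih, PySem.Dict.getD_modify]
    by_cases h : s = c.2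
    · simp [h]
    · have hb : (c.2 == s) = false := by
        simp only [beq_eq_false_iff_ne, ne_eq]
        exact fun hc => h hc.symm
      simp [h, hb]

theorem find_flushes_5plus_eq (hand_cards : List (String × String)) :
    find_flushes_5plus hand_cards = find_flushes_5plus_alt hand_cards := by
  show (let by_suit : PySem.Dict String (List (String × String)) :=
      hand_cards.foldl (fun d c => d.modify c.2 [] (· ++ [c])) PySem.Dict.empty
    by_suit.items.foldl
      (fun out p => if p.2.length ≥ 5 then out ++ (pyCombs 5 p.2).take 25 else out) []) =
    (hand_cards.foldl (fun suits c => if suits.contains c.2 then suits else suits ++ [c.2]) []).foldl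
      (fun out s =>
        if (hand_cards.filter (fun c => c.2 == s)).length ≥ 5 then
          out ++ dpCombs5 (hand_cards.filter (fun c => c.2 == s)) else out) []
  simp only
  have hnd : (hand_cards.foldl (fun d c => d.modify c.2 [] (· ++ [c]))
      (PySem.Dict.empty : PySem.Dict String (List (String × String)))).keys.Nodup :=
    PySem.Dict.nodup_keys_foldl_modify_key hand_cards (·.2) [] _ _ PySem.Dict.nodup_keys_empty
  rw [PySem.Dict.items_eq_map_keys _ hnd ([] : List (String × String)), List.foldl_map]
  have hkeys : (hand_cards.foldl (fun d c => d.modify c.2 [] (· ++ [c]))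
      (PySem.Dict.empty : PySem.Dict String (List (String × String)))).keys =
      hand_cards.foldl (fun suits c => if suits.contains c.2 then suits else suits ++ [c.2]) [] := by
    rw [PySem.Dict.keys_foldl_modify_key, PySem.Dict.keys_empty, suits_loop_eq,
      PySem.List.dedup_eq_ofList]
    rfl
  rw [hkeys]
  apply PySem.List.foldl_congr_mem  -- pointwise: both loop bodies agree on every suit
  intro out s _
  rw [getD_group, PySem.Dict.getD_empty, List.nil_append, dpCombs5_eq]

-- ===== VERDICT =====
theorem find_flushes_5plus_spec : Claim_equal_find_flushes_5plus := by
  intro hand_cards _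
  exact find_flushes_5plus_eq hand_cards
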